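-- pv_equiv track=rewrite | github.com/hm-haitham/Fighting-crime-with-Transformers-Empirical-analysis-of-address-parsing-methods-in-payment-data | utils.py | compact_tags
-- ===== SOURCE A (Python) =====
-- def compact_tags(tags):
--     c_tags = []
--     previous = None
--     for t in tags:
--         if t != previous or previous == "CountryCode":
--             c_tags.append(t)
--         previous = t
--     return c_tags
-- ===== SOURCE B (Python) =====
-- def compact_tags(tags):
--     result = []
--     i = 0
--     n = len(tags)
--     while i < n:
--         t = tags[i]
--         j = i
--         while j < n and tags[j] == t:
--             j += 1
--         if t == "CountryCode":
--             result.extend(tags[i:j])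
--         else:
--             result.append(t)
--         i = j
--     return result
-- ===== Notes on version B (the rewrite author's own statement) =====
-- stated objective: alternative
-- what changed: Replaces the previous-tracking element-by-element loop with a two-pointer run scanner: each maximal run of equal tags is found at once and emitted whole (CountryCode) or as a single representative.
import Mathlib
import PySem

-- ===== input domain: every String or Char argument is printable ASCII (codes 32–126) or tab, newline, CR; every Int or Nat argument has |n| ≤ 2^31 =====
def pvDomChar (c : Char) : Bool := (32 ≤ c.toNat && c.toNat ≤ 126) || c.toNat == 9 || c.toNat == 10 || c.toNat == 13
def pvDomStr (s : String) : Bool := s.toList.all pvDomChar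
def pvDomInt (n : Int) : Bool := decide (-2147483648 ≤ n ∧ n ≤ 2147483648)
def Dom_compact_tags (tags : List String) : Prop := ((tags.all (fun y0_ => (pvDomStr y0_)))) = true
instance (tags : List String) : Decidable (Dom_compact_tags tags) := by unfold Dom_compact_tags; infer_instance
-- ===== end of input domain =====

-- B collapses each maximal run of equal tags at once with a two-pointer scan instead of
-- tracking the previous element; same output, alternative structure.

-- ===== PORT A =====
-- A: previous-tracking fold; previous : Option String (None at start); 't != previous' is
-- true when previous is None, so the condition is st.2 ≠ some t ∨ st.2 = some "CountryCode".
def compact_tags (tags : List String) : List String :=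
  (tags.foldl
    (fun (st : List String × Option String) t =>
      (if st.2 ≠ some t ∨ st.2 = some "CountryCode" then st.1 ++ [t] else st.1, some t))
    (([] : List String), (none : Option String))).1

-- ===== PORT B =====
-- inner while loop of Source B: advance j while j < n and tags[j] == t
def ctScan (tags : List String) (t : String) (j : Nat) : Nat :=
  if j < tags.length ∧ tags.getD j "" = t then ctScan tags t (j + 1) else j
termination_by tags.length - j
decreasing_by omega

-- needed only for the termination of the outer loop below
theorem ctScan_ge (tags : List String) (t : String) (j : Nat) : j ≤ ctScan tags t j := by
  fun_induction ctScan <;> omega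

theorem ctScan_gt (tags : List String) (t : String) (i : Nat)
    (h : i < tags.length) (ht : tags.getD i "" = t) : i < ctScan tags t i := by
  rw [ctScan]
  simp only [h, ht, and_self, if_pos]
  have := ctScan_ge tags t (i + 1)
  omega

-- outer while loop of Source B: result accumulator, i the current index
def ctOuter (tags : List String) (result : List String) (i : Nat) : List String :=
  if h : i < tags.length then
    let t := tags.getD i ""
    let j := ctScan tags t i
    ctOuter tags
      (if t = "CountryCode" then result ++ (tags.drop i).take (j - i) else result ++ [t]) j
  else result
termination_by tags.length - i
decreasing_by
  have := ctScan_gt tags (tags.getD i "") i h rfl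
  omega

def compact_tags_alt (tags : List String) : List String := ctOuter tags [] 0

-- ===== PRECONDITION & SPEC =====
def Spec_compact_tags (tags : List String) (out : List String) : Prop := out = compact_tags_alt tags
instance (tags : List String) (out : List String) : Decidable (Spec_compact_tags tags out) := by unfold Spec_compact_tags; infer_instance

-- ===== CLAIM (what is proved, stated in full; the proofs are below) =====
def Claim_equal_compact_tags : Prop := ∀ (tags : List String), Dom_compact_tags tags → Spec_compact_tags tags (compact_tags tags)

-- ===== LEMMAS AND PROOFS =====

-- A's fold with an explicit previous value
def goA (tags : List String) (prev : Option String) : List String :=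
  (tags.foldl
    (fun (st : List String × Option String) t =>
      (if st.2 ≠ some t ∨ st.2 = some "CountryCode" then st.1 ++ [t] else st.1, some t))
    (([] : List String), prev)).1

-- reference run-based function both sides are reduced to
def runSpec : List String → List String
  | [] => []
  | t :: ts =>
      (if t = "CountryCode" then t :: ts.takeWhile (· == t) else [t]) ++
        runSpec (ts.dropWhile (· == t))
termination_by l => l.length
decreasing_by
  have := List.length_dropWhile_le (p := (· == t)) (l := ts)
  simp; omega

theorem goA_acc (tags : List String) (prev : Option String) (acc : List String) :
    (tags.foldl
      (fun (st : List String × Option String) t =>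
        (if st.2 ≠ some t ∨ st.2 = some "CountryCode" then st.1 ++ [t] else st.1, some t))
      (acc, prev)).1 = acc ++ goA tags prev := by
  induction tags generalizing acc prev with
  | nil => simp [goA]
  | cons t ts ih =>
      simp only [List.foldl_cons, goA]
      split_ifs with hc <;> simp [ih, List.append_assoc]

theorem goA_cons (t : String) (ts : List String) (prev : Option String) :
    goA (t :: ts) prev =
      (if prev ≠ some t ∨ prev = some "CountryCode" then [t] else []) ++ goA ts (some t) := by
  show (List.foldl _ (if prev ≠ some t ∨ prev = some "CountryCode" then [] ++ [t] else [], some t) ts).1 = _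
  by_cases hc : prev ≠ some t ∨ prev = some "CountryCode"
  · rw [if_pos hc, if_pos hc, goA_acc]
    simp
  · rw [if_neg hc, if_neg hc, goA_acc]

theorem goA_run (run rest : List String) (t : String) (hall : ∀ x ∈ run, x = t) :
    goA (run ++ rest) (some t) =
      (if t = "CountryCode" then run else []) ++ goA rest (some t) := by
  induction run with
  | nil => simp
  | cons x xs ih =>
      have hx : x = t := hall x (by simp)
      subst hx
      rw [List.cons_append, goA_cons, ih (fun y hy => hall y (by simp [hy]))]
      by_cases hcc : x = "CountryCode" <;> simp [hcc]

theorem goA_reset (rest : List String) (t : String)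
    (h : ∀ r ∈ rest.head?, r ≠ t) : goA rest (some t) = goA rest none := by
  cases rest with
  | nil => rfl
  | cons r rs =>
      have hr : r ≠ t := h r (by simp)
      rw [goA_cons, goA_cons]
      simp [Ne.symm hr]

theorem head_dropWhile_ne (ts : List String) (t : String) :
    ∀ r ∈ (ts.dropWhile (· == t)).head?, r ≠ t := by
  induction ts with
  | nil => simp
  | cons a as ih =>
      by_cases h : a = t
      · simpa [h] using ih
      · simp [List.dropWhile_cons, h]

theorem goA_eq_runSpec (l : List String) : goA l none = runSpec l := by
  induction l using runSpec.induct with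
  | case1 => simp [goA, runSpec]
  | case2 t ts ih =>
      have hsplit : ts = ts.takeWhile (· == t) ++ ts.dropWhile (· == t) :=
        (List.takeWhile_append_dropWhile (p := (· == t)) (l := ts)).symm
      have hall : ∀ x ∈ ts.takeWhile (· == t), x = t := by
        intro x hx
        simpa using List.mem_takeWhile_imp hx
      rw [goA_cons]
      conv_lhs => rw [hsplit]
      rw [goA_run _ _ t hall, goA_reset _ t (head_dropWhile_ne ts t), ih, runSpec]
      by_cases hcc : t = "CountryCode" <;> simp [hcc]

theorem ctScan_eq (tags : List String) (t : String) (j : Nat) :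
    ctScan tags t j = j + ((tags.drop j).takeWhile (· == t)).length := by
  fun_induction ctScan with
  | case1 j h ih =>
      obtain ⟨hj, ht⟩ := h
      have hdrop : tags.drop j = tags[j] :: tags.drop (j + 1) :=
        List.drop_eq_getElem_cons hj
      have hget : tags[j] = t := (List.getD_eq_getElem tags "" hj) ▸ ht
      rw [ih, hdrop]
      simp [hget]
      omega
  | case2 j h =>
      rcases Nat.lt_or_ge j tags.length with hj | hj
      · have ht : tags.getD j "" ≠ t := fun hx => h ⟨hj, hx⟩
        have hget : tags.getD j "" = tags[j] := List.getD_eq_getElem tags "" hj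
        have hne : (tags[j] == t) = false := by
          rw [beq_eq_false_iff_ne, ← hget]; exact ht
        rw [List.drop_eq_getElem_cons hj, List.takeWhile_cons, hne]
        simp
      · rw [List.drop_eq_nil_of_le hj]
        simp

theorem ctOuter_eq (tags : List String) (res : List String) (i : Nat) :
    ctOuter tags res i = res ++ runSpec (tags.drop i) := by
  fun_induction ctOuter with
  | case1 res i h t j ih =>
      have hget : tags.getD i "" = tags[i] := List.getD_eq_getElem tags "" h
      have hdrop : tags.drop i = tags[i] :: tags.drop (i + 1) :=
        List.drop_eq_getElem_cons h
      have hts : tags[i] = t := hget.symm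
      set tw := (tags.drop (i + 1)).takeWhile (· == t) with htw
      have hbeq : (tags[i] == t) = true := by simp [hts]
      have hscan : j = i + 1 + tw.length := by
        show ctScan tags t i = _
        rw [ctScan_eq, hdrop, List.takeWhile_cons, hbeq]
        simp [htw]
        omega
      have hsplit : tags.drop (i + 1) = tw ++ (tags.drop (i + 1)).dropWhile (· == t) := by
        rw [htw]; exact (List.takeWhile_append_dropWhile).symm
      have htake : (tags.drop i).take (j - i) = t :: tw := by
        rw [hdrop]
        have hji : j - i = tw.length + 1 := by omega
        rw [hji, List.take_succ_cons, hts]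
        congr 1
        conv_lhs => rw [hsplit]
        exact List.take_left
      have hdropj : tags.drop j = (tags.drop (i + 1)).dropWhile (· == t) := by
        have h1 : tags.drop j = (tags.drop (i + 1)).drop tw.length := by
          rw [List.drop_drop]; congr 1
        rw [h1]
        conv_lhs => rw [hsplit]
        exact List.drop_left
      by_cases hcc : t = "CountryCode"
      · rw [dif_pos hcc] at ih
        rw [if_pos hcc]
        rw [ih, hdropj]
        conv_rhs => rw [hdrop, hts]
        rw [runSpec, if_pos hcc, htake, ← htw]
        simp [List.append_assoc]
      · rw [dif_neg hcc] at ih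
        rw [if_neg hcc]
        rw [ih, hdropj]
        conv_rhs => rw [hdrop, hts]
        rw [runSpec, if_neg hcc]
        simp [List.append_assoc]
  | case2 res i h =>
      rw [List.drop_eq_nil_of_le (by omega)]
      simp [runSpec]

-- ===== VERDICT (by name: the statement is the Claim_ definition above) =====
theorem compact_tags_spec : Claim_equal_compact_tags := by
  intro tags _
  show compact_tags tags = compact_tags_alt tags
  have hA : compact_tags tags = goA tags none := rfl
  rw [hA, goA_eq_runSpec, compact_tags_alt, ctOuter_eq]
  simp
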